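-- pv_equiv track=rewrite | github.com/karkonium/tweats | tweets.py | get_usernames
-- ===== SOURCE A (Python) =====
-- from typing import List, Dict, TextIO, Tuple
--
-- def get_usernames(text: List[str]) -> List[int]:
--     """ Returns all usernames from text.
--
--     >>> get_usernames(['UofTSci:\\n', '20181109190529\\n', 'lol:\\n'])
--     [0]
--     >>> get_usernames(['UofT:\\n', '<<<EOT\\n', 'lol:\\n'])
--     [0, 2]
--
--     """
--     potential = get_indexes(text, ':\n')
--     username = []
--     for index in potential:
--         # aside from the 1st username, all usernames must be precessed by
--         # '<<<EOT' or by another username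
--         if (index == potential[0] or text[index - 1] == '<<<EOT\n' or \
--         (index - 1) in username):
--             username += [index]
--     return username
--
-- def get_indexes(text: List[str], s: str) -> List[int]:
--     """Return indexes of all elements that end with s in text
--
--     >>> get_indexes(['UofTSci:\\n', '20181109190529\\n', 'lol:\\n'], ':\\n')
--     [0, 2]
--     >>> get_indexes(['UofT:\\n??', '<<<EOT\\n', 'lol:\\n??'], '??')
--     [0, 2]
--
--     """
--     result = []
--
--     for i in range(len(text)):
--         if text[i].endswith(s):
--             result += [i]
--
--     return result
-- ===== SOURCE B (Python) =====
-- def get_usernames(text):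
--     """Single pass over enumerate(text) with two boolean flags instead of
--     a separate index-collection pass plus membership scans."""
--     username = []
--     seen_first = False
--     prev_is_username = False
--     for i, line in enumerate(text):
--         if line.endswith(':\n'):
--             if not seen_first or text[i - 1] == '<<<EOT\n' or prev_is_username:
--                 username.append(i)
--                 prev_is_username = True
--             else:
--                 prev_is_username = False
--             seen_first = True
--         else:
--             prev_is_username = False
--     return username
-- ===== Notes on version B (the rewrite author's own statement) =====
-- stated objective: simpler
-- what changed: Replaces A's two passes (collect all indices of lines ending in ':\n', then re-scan that list testing membership of index-1 in the growing result) by a single loop over enumerate(text) carrying two booleans, seen_first and prev_is_username, so the intermediate index list and the inner membership scan disappear.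
import Mathlib
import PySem

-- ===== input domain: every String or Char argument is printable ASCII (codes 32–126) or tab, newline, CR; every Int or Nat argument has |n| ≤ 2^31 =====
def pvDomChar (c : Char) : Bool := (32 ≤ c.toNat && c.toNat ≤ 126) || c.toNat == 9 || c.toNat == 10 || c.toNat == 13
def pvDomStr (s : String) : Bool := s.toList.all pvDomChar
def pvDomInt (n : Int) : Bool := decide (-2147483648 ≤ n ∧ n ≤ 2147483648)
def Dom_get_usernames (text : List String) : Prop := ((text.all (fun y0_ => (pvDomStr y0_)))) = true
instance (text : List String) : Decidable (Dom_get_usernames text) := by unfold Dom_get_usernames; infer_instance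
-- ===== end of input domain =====

-- B folds ONE pass over enumerate(text) with two boolean flags instead of A's
-- index-collection pass followed by a membership-scanning pass (objective: simpler).

-- ===== PORT A =====
-- helper get_indexes: 'for i in range(len(text)): if text[i].endswith(s): result += [i]'
-- (text[i] is always in range here, so pyGetD with a default is exact)
def get_indexes (text : List String) (s : String) : List Int :=
  (PySem.List.pyRange 0 (PySem.List.len text) 1).foldl
    (fun result i =>
      if PySem.Str.endswith (PySem.List.pyGetD text i "") s then result ++ [i] else result) []

-- 'for index in potential: …'; pot0 is potential[0], evaluated only with potential nonempty,
-- so headD 0 at the call site is exact.  text[index-1] via pyGetD (negative index wraps as in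
-- Python; the value is only relevant when index ≥ 1, where it is in range).
def get_usernames_loop (text : List String) (pot0 : Int) : List Int → List Int → List Int
  | u, [] => u
  | u, index :: rest =>
      if index == pot0 || PySem.List.pyGetD text (index - 1) "" == "<<<EOT\n"
          || u.contains (index - 1) then
        get_usernames_loop text pot0 (u ++ [index]) rest
      else
        get_usernames_loop text pot0 u rest

def get_usernames (text : List String) : List Int :=
  let potential := get_indexes text ":\n"
  get_usernames_loop text (potential.headD 0) [] potential

-- ===== PORT B =====
-- 'for i, line in enumerate(text)' with state (username, seen_first, prev_is_username)
def get_usernames_alt_loop (text : List String) :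
    List Int → Bool → Bool → List (Int × String) → List Int
  | u, _, _, [] => u
  | u, seen, prev, (i, line) :: rest =>
      if PySem.Str.endswith line ":\n" then
        if !seen || PySem.List.pyGetD text (i - 1) "" == "<<<EOT\n" || prev then
          get_usernames_alt_loop text (u ++ [i]) true true rest
        else
          get_usernames_alt_loop text u true false rest
      else
        get_usernames_alt_loop text u seen false rest

def get_usernames_alt (text : List String) : List Int :=
  get_usernames_alt_loop text [] false false (PySem.List.enumerate text 0)

-- ===== PRECONDITION & SPEC =====
def Spec_get_usernames (text : List String) (out : List Int) : Prop := out = get_usernames_alt text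
instance (text : List String) (out : List Int) : Decidable (Spec_get_usernames text out) := by unfold Spec_get_usernames; infer_instance

-- ===== CLAIM (what is proved, stated in full; the proofs are below) =====
def Claim_equal_get_usernames : Prop := ∀ (text : List String), Dom_get_usernames text → Spec_get_usernames text (get_usernames text)

-- ===== LEMMAS AND PROOFS =====

-- proof-side view of A's 'potential' list: indices ≥ k (in order) of lines ending in ':\n'
def pot (k : Int) : List String → List Int
  | [] => []
  | l :: ls => if PySem.Str.endswith l ":\n" then k :: pot (k + 1) ls else pot (k + 1) ls

lemma pot_filterMap (ts : List String) : ∀ k : Int,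
    (PySem.List.enumerate ts k).filterMap
      (fun p => if PySem.Str.endswith p.2 ":\n" then some p.1 else none) = pot k ts := by
  induction ts with
  | nil => intro k; simp [pot, PySem.List.enumerate_nil]
  | cons t ts ih =>
    intro k
    rw [PySem.List.enumerate_cons, List.filterMap_cons]
    cases hm : PySem.Str.endswith t ":\n" with
    | true => simp only [pot, hm, reduceIte, ih]
    | false => simp only [pot, hm, Bool.false_eq_true, if_false, ih]

lemma filterMap_if_eq_filter (l : List Int) (p : Int → Bool) :
    l.filterMap (fun j => if p j then some j else none) = l.filter p := by
  induction l with
  | nil => rfl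
  | cons a l ih => by_cases h : p a <;> simp [h, ih]

lemma get_indexes_eq (text : List String) : get_indexes text ":\n" = pot 0 text := by
  unfold get_indexes
  rw [PySem.List.foldl_append_if_eq_filter, ← pot_filterMap text 0]
  rw [PySem.List.enumerate_eq_map_pyRange text "", List.filterMap_map]
  rw [← filterMap_if_eq_filter]
  simp only [List.nil_append]
  rfl

lemma contains_false_of_lt {u : List Int} {k : Int} (h : ∀ x ∈ u, x < k) :
    u.contains k = false := by
  simp only [List.contains_eq_mem, decide_eq_false_iff_not]
  exact fun hk => absurd (h k hk) (lt_irrefl k)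

lemma main_loop (text : List String) (h : Int) :
    ∀ (ts : List String) (k : Int) (u : List Int) (seen prev : Bool),
    (∀ x ∈ u, x < k) →
    prev = u.contains (k - 1) →
    (seen = false → pot k ts ≠ [] → h = (pot k ts).headD 0) →
    (seen = true → h < k) →
    get_usernames_loop text h u (pot k ts)
      = get_usernames_alt_loop text u seen prev (PySem.List.enumerate ts k) := by
  intro ts
  induction ts with
  | nil => intro k u seen prev _ _ _ _; simp [pot, PySem.List.enumerate_nil,
      get_usernames_loop, get_usernames_alt_loop]
  | cons t ts ih =>
    intro k u seen prev hb hprev hns hs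
    rw [PySem.List.enumerate_cons]
    by_cases hm : PySem.Str.endswith t ":\n" = true
    · have hpot : pot k (t :: ts) = k :: pot (k + 1) ts := by
        simp only [pot]; rw [if_pos hm]
      have hh_le : seen = true ∨ h = k := by
        cases seen with
        | true => exact Or.inl rfl
        | false =>
          refine Or.inr ?_
          have := hns rfl (by rw [hpot]; exact List.cons_ne_nil _ _)
          rw [hpot] at this
          simpa using this
      have hkh : (k == h) = !seen := by
        cases seen with
        | true =>
          have hlt := hs rfl
          have : k ≠ h := by omega
          simp [this]
        | false =>
          rcases hh_le with hcontra | hk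
          · exact absurd hcontra (by simp)
          · simp [hk]
      have hhk1 : h < k + 1 := by
        rcases hh_le with hseen | hk
        · have := hs hseen; omega
        · omega
      rw [hpot]
      simp only [get_usernames_loop, get_usernames_alt_loop]
      rw [if_pos hm, hkh, ← hprev]
      by_cases hc : (!seen || PySem.List.pyGetD text (k - 1) "" == "<<<EOT\n" || prev) = true
      · rw [if_pos hc, if_pos hc]
        refine ih (k + 1) (u ++ [k]) true true ?_ ?_ ?_ ?_
        · intro x hx
          rcases List.mem_append.1 hx with hx | hx
          · have := hb x hx; omega
          · simp at hx; omega
        · have : k + 1 - 1 = k := by ring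
          rw [this]
          simp [List.contains_eq_mem]
        · intro hfalse; exact absurd hfalse (by simp)
        · intro _; exact hhk1
      · rw [if_neg hc, if_neg hc]
        refine ih (k + 1) u true false ?_ ?_ ?_ ?_
        · intro x hx; have := hb x hx; omega
        · have : k + 1 - 1 = k := by ring
          rw [this, contains_false_of_lt hb]
        · intro hfalse; exact absurd hfalse (by simp)
        · intro _; exact hhk1
    · have hpot : pot k (t :: ts) = pot (k + 1) ts := by
        simp only [pot]; rw [if_neg hm]
      rw [hpot]
      simp only [get_usernames_alt_loop]
      rw [if_neg hm]
      refine ih (k + 1) u seen false ?_ ?_ ?_ ?_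
      · intro x hx; have := hb x hx; omega
      · have : k + 1 - 1 = k := by ring
        rw [this, contains_false_of_lt hb]
      · intro hfalse hne
        rw [← hpot] at hne
        rw [hns hfalse hne, hpot]
      · intro htrue; have := hs htrue; omega

-- ===== VERDICT (by name: the statement is the Claim_ definition above) =====
theorem get_usernames_spec : Claim_equal_get_usernames := by
  intro text _
  unfold Spec_get_usernames get_usernames get_usernames_alt
  rw [get_indexes_eq]
  exact main_loop text ((pot 0 text).headD 0) text 0 [] false false
    (by simp) (by simp) (fun _ _ => rfl) (by simp)
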